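-- pv_equiv track=rewrite | github.com/KobekingLu/AI-Engineering-Decision-Agent | web_app/intake.py | _collapse_block
-- ===== SOURCE A (Python) =====
-- def _collapse_block(text: str) -> str:
--     lines = []
--     for raw_line in text.splitlines():
--         line = raw_line.strip(" -")
--         if not line:
--             if lines and lines[-1] != "":
--                 lines.append("")
--             continue
--         if lines and line == lines[-1]:
--             continue
--         lines.append(line)
--     return "\n".join(lines).strip()
-- ===== SOURCE B (Python) =====
-- def _dedup(xs):
--     # divide and conquer: collapse consecutive duplicates in each half,
--     # then fix up the single boundary between the halves
--     if len(xs) <= 1: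
--         return xs[:]
--     mid = len(xs) // 2
--     left = _dedup(xs[:mid])
--     right = _dedup(xs[mid:])
--     if left[-1] == right[0]:
--         return left + right[1:]
--     return left + right
--
-- def _collapse_block(text: str) -> str:
--     stripped = [ln.strip(" -") for ln in text.splitlines()]
--     return "\n".join(_dedup(stripped)).strip()
-- ===== Notes on version B (the rewrite author's own statement) =====
-- stated objective: alternative
-- what changed: Replaces A's single stateful left-to-right loop (which special-cases blank lines and duplicates via lines[-1]) with a staged pipeline: strip every line first, then collapse consecutive duplicates by a divide-and-conquer recursion that deduplicates each half and mends the one boundary, then join and strip the result.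
import Mathlib
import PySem

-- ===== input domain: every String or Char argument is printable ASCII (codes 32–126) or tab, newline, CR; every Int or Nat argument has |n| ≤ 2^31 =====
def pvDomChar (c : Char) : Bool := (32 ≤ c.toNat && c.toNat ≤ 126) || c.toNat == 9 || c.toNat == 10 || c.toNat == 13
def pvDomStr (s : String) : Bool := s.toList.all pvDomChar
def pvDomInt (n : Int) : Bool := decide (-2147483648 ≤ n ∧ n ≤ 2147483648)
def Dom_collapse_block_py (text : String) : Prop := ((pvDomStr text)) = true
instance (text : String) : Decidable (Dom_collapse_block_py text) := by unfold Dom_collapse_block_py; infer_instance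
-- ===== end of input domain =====

-- B replaces A's stateful single loop (blank lines and duplicates special-cased via lines[-1])
-- with a staged pipeline: strip all lines, collapse consecutive duplicates by divide-and-conquer
-- (dedup each half, mend the one boundary), join, strip. Alternative decomposition, same result.

-- ===== PORT A =====
-- A's loop; the accumulator is kept reversed (head = Python's lines[-1]), reversed back before the join.
def collapseA_step (acc : List String) (raw : String) : List String :=
  let line := PySem.Str.stripChars raw " -"
  if line = "" then
    (if acc ≠ [] ∧ acc.head? ≠ some "" then "" :: acc else acc)
  else if acc ≠ [] ∧ acc.head? = some line then acc
  else line :: acc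

def collapse_block_py (text : String) : String :=
  PySem.Str.strip (PySem.Str.join "\n" (((PySem.Str.splitlines text).foldl collapseA_step []).reverse))

-- ===== PORT B =====
-- Source B's _dedup; xs[:mid] / xs[mid:] with 0 <= mid <= len are exactly take/drop
-- (PySem.List.slice_to / slice_from). pvMerge is the boundary fix-up (the if on
-- left[-1] == right[0]); its option match makes the reads total, the fallthrough arm
-- is unreachable since both halves are nonempty whenever len >= 2.
def pvMerge (left right : List String) : List String :=
  match left.getLast?, right.head? with
  | some a, some b => if a = b then left ++ right.tail else left ++ right
  | _, _ => left ++ right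

def pvDedup (xs : List String) : List String :=
  if xs.length <= 1 then xs
  else pvMerge (pvDedup (xs.take (xs.length / 2))) (pvDedup (xs.drop (xs.length / 2)))
termination_by xs.length
decreasing_by
  · simp only [List.length_take]; omega
  · simp only [List.length_drop]; omega

def collapse_block_py_alt (text : String) : String :=
  PySem.Str.strip (PySem.Str.join "\n"
    (pvDedup ((PySem.Str.splitlines text).map (fun ln => PySem.Str.stripChars ln " -"))))

-- ===== PRECONDITION & SPEC =====
def Spec_collapse_block_py (text : String) (out : String) : Prop := out = collapse_block_py_alt text
instance (text : String) (out : String) : Decidable (Spec_collapse_block_py text out) := by unfold Spec_collapse_block_py; infer_instance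

-- ===== CLAIM (what is proved, stated in full; the proofs are below) =====
def Claim_equal_collapse_block_py : Prop := ∀ (text : String), Dom_collapse_block_py text → Spec_collapse_block_py text (collapse_block_py text)

-- ===== LEMMAS AND PROOFS =====

-- linear reference dedup: keep the first element of each run of consecutive equal elements
def pvGroupGo (prev : String) : List String → List String
  | [] => []
  | x :: xs => if x = prev then pvGroupGo prev xs else x :: pvGroupGo x xs

def pvGroupKeys : List String → List String
  | [] => []
  | x :: xs => x :: pvGroupGo x xs

-- ---- A's foldl equals the linear dedup (seeded with prev = "") ----

theorem collapseA_step_cons (h : String) (t : List String) (raw : String) :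
    collapseA_step (h :: t) raw =
      (if PySem.Str.stripChars raw " -" = h then h :: t
       else PySem.Str.stripChars raw " -" :: h :: t) := by
  unfold collapseA_step
  by_cases hb : PySem.Str.stripChars raw " -" = ""
  · by_cases hh : h = ""
    · simp [hb, hh]
    · simp [hb, hh, Ne.symm hh]
  · by_cases hh : h = PySem.Str.stripChars raw " -"
    · simp [hb, hh]
    · simp [hb, hh]
      exact fun e => hh e.symm

theorem foldl_collapseA_cons (S : List String) : ∀ (h : String) (t : List String),
    S.foldl collapseA_step (h :: t) =
      (pvGroupGo h (S.map (fun ln => PySem.Str.stripChars ln " -"))).reverse ++ (h :: t) := by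
  induction S with
  | nil => intro h t; simp [pvGroupGo]
  | cons x S' ih =>
    intro h t
    simp only [List.foldl_cons, List.map_cons, collapseA_step_cons]
    by_cases hx : PySem.Str.stripChars x " -" = h
    · simp [hx, pvGroupGo, ih]
    · simp [hx, pvGroupGo, ih]

theorem foldl_collapseA_nil (S : List String) :
    S.foldl collapseA_step [] =
      (pvGroupGo "" (S.map (fun ln => PySem.Str.stripChars ln " -"))).reverse := by
  induction S with
  | nil => simp [pvGroupGo]
  | cons x S' ih =>
    by_cases hx : PySem.Str.stripChars x " -" = ""
    · have : collapseA_step [] x = [] := by simp [collapseA_step, hx]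
      simp [List.foldl_cons, this, ih, pvGroupGo, hx]
    · have : collapseA_step [] x = [PySem.Str.stripChars x " -"] := by
        simp [collapseA_step, hx]
      simp [List.foldl_cons, this, foldl_collapseA_cons, pvGroupGo, hx]

-- ---- basic facts about the linear dedup ----

theorem pvGroupGo_getLastD (p : String) (l : List String) :
    (pvGroupGo p l).getLastD p = l.getLastD p := by
  induction l generalizing p with
  | nil => rfl
  | cons x l ih =>
    by_cases hx : x = p
    · rw [pvGroupGo, if_pos hx, List.getLastD_cons, ih, hx]
    · rw [pvGroupGo, if_neg hx, List.getLastD_cons, List.getLastD_cons, ih]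

theorem pvGroupGo_append (p : String) (l1 l2 : List String) :
    pvGroupGo p (l1 ++ l2) = pvGroupGo p l1 ++ pvGroupGo (l1.getLastD p) l2 := by
  induction l1 generalizing p with
  | nil => simp [pvGroupGo]
  | cons x l1 ih =>
    by_cases hx : x = p
    · rw [List.cons_append, pvGroupGo, if_pos hx, pvGroupGo, if_pos hx, ih,
        List.getLastD_cons, hx]
    · rw [List.cons_append, pvGroupGo, if_neg hx, pvGroupGo, if_neg hx, ih,
        List.getLastD_cons, List.cons_append]

-- pvGroupGo with a prev equal to the head skips the whole leading run
theorem pvGroupGo_head (p y : String) (ys : List String) :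
    pvGroupGo p (y :: ys) = if y = p then pvGroupGo y ys else y :: pvGroupGo y ys := by
  by_cases h : y = p
  · rw [pvGroupGo, if_pos h, if_pos h, h]
  · rw [pvGroupGo, if_neg h, if_neg h]

theorem pvGroupKeys_getLast? (x : String) (xs : List String) :
    (pvGroupKeys (x :: xs)).getLast? = (x :: xs).getLast? := by
  show (x :: pvGroupGo x xs).getLast? = _
  rw [List.getLast?_cons, List.getLast?_cons]
  have h := pvGroupGo_getLastD x xs
  rw [List.getLastD_eq_getLast?, List.getLastD_eq_getLast?] at h
  rw [h]

-- keys of an append: keys of the left part, then continue on the right with prev = last of left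
theorem pvGroupKeys_append (x : String) (xs ys : List String) :
    pvGroupKeys ((x :: xs) ++ ys) =
      pvGroupKeys (x :: xs) ++ pvGroupGo (xs.getLastD x) ys := by
  show x :: pvGroupGo x (xs ++ ys) = (x :: pvGroupGo x xs) ++ _
  rw [pvGroupGo_append, List.cons_append]

-- ---- the divide-and-conquer dedup equals the linear dedup ----

theorem pvMerge_keys (t d : String) (ts ds : List String) :
    pvMerge (pvGroupKeys (t :: ts)) (pvGroupKeys (d :: ds)) =
      pvGroupKeys ((t :: ts) ++ (d :: ds)) := by
  rw [pvGroupKeys_append, pvMerge, pvGroupKeys_getLast?]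
  have hhead : (pvGroupKeys (d :: ds)).head? = some d := rfl
  rw [hhead, List.getLast?_cons]
  by_cases hb : ts.getLastD t = d
  all_goals rw [List.getLastD_eq_getLast?] at hb
  · show (if ts.getLast?.getD t = d then _ else _) = _
    rw [if_pos hb]
    congr 1
    rw [List.getLastD_eq_getLast?, pvGroupGo_head, if_pos hb.symm]
    rfl
  · show (if ts.getLast?.getD t = d then _ else _) = _
    rw [if_neg hb]
    congr 1
    rw [List.getLastD_eq_getLast?, pvGroupGo_head, if_neg (fun e => hb e.symm)]
    rfl

theorem pvDedup_eq_keys (l : List String) : pvDedup l = pvGroupKeys l := by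
  induction l using pvDedup.induct with
  | case1 xs h =>
    rw [pvDedup, if_pos h]
    match xs, h with
    | [], _ => rfl
    | [x], _ => rfl
  | case2 xs h ih1 ih2 =>
    rw [pvDedup, if_neg h, ih1, ih2]
    have hlen : 2 ≤ xs.length := by omega
    have hmid1 : 1 ≤ xs.length / 2 := by omega
    have hmidlt : xs.length / 2 < xs.length := by omega
    obtain ⟨t, ts, ht⟩ : ∃ t ts, xs.take (xs.length / 2) = t :: ts := by
      cases htk : xs.take (xs.length / 2) with
      | nil =>
        exfalso
        have := congrArg List.length htk
        simp only [List.length_take, List.length_nil] at this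
        omega
      | cons t ts => exact ⟨t, ts, rfl⟩
    obtain ⟨d, ds, hd⟩ : ∃ d ds, xs.drop (xs.length / 2) = d :: ds := by
      cases hdr : xs.drop (xs.length / 2) with
      | nil =>
        exfalso
        have := congrArg List.length hdr
        simp only [List.length_drop, List.length_nil] at this
        omega
      | cons d ds => exact ⟨d, ds, rfl⟩
    rw [ht, hd, pvMerge_keys, ← ht, ← hd, List.take_append_drop]

-- ---- the final strip absorbs the one possible leading blank line ----

theorem strip_join_cons_empty (m : List String) :
    PySem.Str.strip (PySem.Str.join "\n" ("" :: m)) = PySem.Str.strip (PySem.Str.join "\n" m) := by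
  have h : (PySem.Str.strip (PySem.Str.join "\n" ("" :: m))).toList
      = (PySem.Str.strip (PySem.Str.join "\n" m)).toList := by
    simp only [PySem.Str.toList_strip, PySem.Str.toList_join, List.map_cons]
    cases m with
    | nil => rfl
    | cons y ys =>
      show PySem.Chars.strip (PySem.Chars.join _ ([] :: _)) = _
      have hnl : ("\n" : String).toList = ['\n'] := rfl
      simp only [PySem.Chars.join, List.intercalate, hnl]
      have hsp : PySem.Chars.isspace '\n' = true := by decide
      simp [PySem.Chars.strip, PySem.Chars.lstrip, hsp]
  exact String.toList_injective h

theorem strip_join_groupGo_keys (l : List String) :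
    PySem.Str.strip (PySem.Str.join "\n" (pvGroupGo "" l)) =
      PySem.Str.strip (PySem.Str.join "\n" (pvGroupKeys l)) := by
  cases l with
  | nil => rfl
  | cons x xs =>
    by_cases hx : x = ""
    · subst hx
      simp only [pvGroupKeys, pvGroupGo]
      exact (strip_join_cons_empty (pvGroupGo "" xs)).symm
    · simp [pvGroupKeys, pvGroupGo, hx]

-- ===== VERDICT (by name: the statement is the Claim_ definition above) =====
theorem collapse_block_py_spec : Claim_equal_collapse_block_py := by
  intro text _
  show collapse_block_py text = collapse_block_py_alt text
  unfold collapse_block_py collapse_block_py_alt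
  rw [foldl_collapseA_nil, List.reverse_reverse, pvDedup_eq_keys, strip_join_groupGo_keys]
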